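-- pv_equiv track=rewrite | github.com/aamychen/amuse-django-codepipeline-test | src/releases/validators.py | split_does_not_have_multiple_splits_for_same_user
-- ===== SOURCE A (Python) =====
-- from collections import defaultdict
--
-- def split_does_not_have_multiple_splits_for_same_user(split_data):
--     grouped_splits = _group_splits_by_revision(split_data)
--
--     for _, splits in grouped_splits.items():
--         users_per_revision = [
--             s["royalty_splits__user_id"]
--             for s in splits
--             if s["royalty_splits__user_id"] is not None
--         ]
--
--         if len(users_per_revision) != len(set(users_per_revision)):
--             return False
--
--     return True
--
-- def _group_splits_by_revision(split_data):
--     grouped_splits = defaultdict(list)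
--
--     for split in split_data:
--         grouped_splits[split["royalty_splits__revision"]].append(split)
--
--     return grouped_splits
-- ===== SOURCE B (Python) =====
-- def split_does_not_have_multiple_splits_for_same_user(split_data):
--     seen = set()
--     for split in split_data:
--         user = split["royalty_splits__user_id"]
--         if user is None:
--             continue
--         key = (split["royalty_splits__revision"], user)
--         if key in seen:
--             return False
--         seen.add(key)
--     return True
-- ===== Notes on version B (the rewrite author's own statement) =====
-- stated objective: simpler
-- what changed: Replaces the group-by-revision helper plus per-revision duplicate check with a single fused pass over split_data maintaining one seen-set of (revision, user) pairs, returning False at the first repeat.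
import Mathlib
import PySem

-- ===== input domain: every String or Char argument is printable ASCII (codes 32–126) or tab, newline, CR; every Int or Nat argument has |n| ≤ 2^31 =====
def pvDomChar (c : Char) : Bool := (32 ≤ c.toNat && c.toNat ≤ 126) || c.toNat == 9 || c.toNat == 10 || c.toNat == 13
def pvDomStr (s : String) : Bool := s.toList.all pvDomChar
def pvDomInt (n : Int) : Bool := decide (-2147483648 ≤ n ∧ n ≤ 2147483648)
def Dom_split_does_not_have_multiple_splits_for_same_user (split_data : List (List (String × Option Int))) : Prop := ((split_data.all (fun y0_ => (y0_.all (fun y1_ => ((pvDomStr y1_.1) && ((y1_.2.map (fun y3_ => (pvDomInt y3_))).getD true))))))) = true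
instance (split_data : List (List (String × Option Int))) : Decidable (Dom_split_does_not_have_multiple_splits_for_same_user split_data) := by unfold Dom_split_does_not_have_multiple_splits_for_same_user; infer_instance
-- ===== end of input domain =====

-- B replaces A's group-by-revision helper + per-revision duplicate check with one fused pass
-- over split_data keeping a single seen-set of (revision, user) pairs (objective: simpler).

-- ===== PORT A =====
-- each split is a Python dict ported as an association list; split["k"] = first match (List.lookup)
def pvRev (s : List (String × Option Int)) : Option Int :=
  (s.lookup "royalty_splits__revision").getD none   -- total form; key present under Pre_

def pvUser? (s : List (String × Option Int)) : Option (Option Int) :=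
  s.lookup "royalty_splits__user_id"                -- none = KeyError, excluded by Pre_

-- _group_splits_by_revision: defaultdict(list) loop, grouped[rev].append(split)
def pvGroupSplitsByRevision (split_data : List (List (String × Option Int))) :
    PySem.Dict (Option Int) (List (List (String × Option Int))) :=
  split_data.foldl (fun d split => d.modify (pvRev split) [] (· ++ [split])) PySem.Dict.empty

def split_does_not_have_multiple_splits_for_same_user (split_data : List (List (String × Option Int))) : Bool :=
  let grouped := pvGroupSplitsByRevision split_data
  -- 'for _, splits in grouped.items(): if len(users) != len(set(users)): return False' / 'return True'
  grouped.items.all (fun kv =>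
    let users := kv.2.filterMap (fun s =>
      match pvUser? s with        -- [s[k] for s in splits if s[k] is not None]; missing key excluded by Pre_
      | some (some u) => some u
      | _ => none)
    users.length == (PySem.Set.ofList users).length)

-- ===== PORT B =====
-- B's own dict lookups (same association-list convention)
def pvRevB (s : List (String × Option Int)) : Option Int :=
  (s.lookup "royalty_splits__revision").getD none   -- total form; key present under Pre_

def pvSeenLoop (seen : PySem.Set (Option Int × Int)) :
    List (List (String × Option Int)) → Bool
  | [] => true
  | split :: rest =>
    -- user = split["royalty_splits__user_id"]; a missing key is excluded by Pre_
    match (split.lookup "royalty_splits__user_id").getD none with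
    | none => pvSeenLoop seen rest  -- user is None: continue
    | some u =>
      let key := (pvRevB split, u)
      if PySem.Set.contains seen key then false
      else pvSeenLoop (PySem.Set.add seen key) rest

def split_does_not_have_multiple_splits_for_same_user_alt (split_data : List (List (String × Option Int))) : Bool :=
  pvSeenLoop PySem.Set.empty split_data

-- ===== PRECONDITION & SPEC =====
-- Pre_: every split carries both keys; a missing key makes the Python A raise KeyError.
def Pre_split_does_not_have_multiple_splits_for_same_user (split_data : List (List (String × Option Int))) : Prop :=
  (split_data.all (fun s => (s.lookup "royalty_splits__revision").isSome
                         && (s.lookup "royalty_splits__user_id").isSome)) = true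
instance (split_data : List (List (String × Option Int))) : Decidable (Pre_split_does_not_have_multiple_splits_for_same_user split_data) := by unfold Pre_split_does_not_have_multiple_splits_for_same_user; infer_instance

def pvWitness_split_does_not_have_multiple_splits_for_same_user : (List (List (String × Option Int))) :=
  [[("royalty_splits__revision", some 1), ("royalty_splits__user_id", some 2)],
   [("royalty_splits__revision", some 1), ("royalty_splits__user_id", none)]]

def Spec_split_does_not_have_multiple_splits_for_same_user (split_data : List (List (String × Option Int))) (out : Bool) : Prop := out = split_does_not_have_multiple_splits_for_same_user_alt split_data
instance (split_data : List (List (String × Option Int))) (out : Bool) : Decidable (Spec_split_does_not_have_multiple_splits_for_same_user split_data out) := by unfold Spec_split_does_not_have_multiple_splits_for_same_user; infer_instance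

-- ===== CLAIM (what is proved, stated in full; the proofs are below) =====
def Claim_equal_split_does_not_have_multiple_splits_for_same_user : Prop := ∀ (split_data : List (List (String × Option Int))), Dom_split_does_not_have_multiple_splits_for_same_user split_data → Pre_split_does_not_have_multiple_splits_for_same_user split_data → Spec_split_does_not_have_multiple_splits_for_same_user split_data (split_does_not_have_multiple_splits_for_same_user split_data)

-- ===== LEMMAS AND PROOFS =====

-- the (revision, user) pairs of the splits whose user id is not None, in order
def pvPairs (l : List (List (String × Option Int))) : List (Option Int × Int) :=
  l.filterMap (fun s =>
    match pvUser? s with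
    | some (some u) => some (pvRev s, u)
    | _ => none)

-- B's loop succeeds iff the seen set extended by the pairs is duplicate-free
theorem pvRevB_eq_pvRev (s : List (String × Option Int)) : pvRevB s = pvRev s := rfl

-- B's loop succeeds iff the seen set extended by the pairs is duplicate-free
theorem pvSeenLoop_iff (l : List (List (String × Option Int)))
    (seen : PySem.Set (Option Int × Int)) (hnd : List.Nodup seen) :
    pvSeenLoop seen l = true ↔ (seen ++ pvPairs l).Nodup := by
  induction l generalizing seen with
  | nil => simpa [pvSeenLoop, pvPairs] using hnd
  | cons s rest ih =>
    cases hu : pvUser? s with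
    | none =>
      have huB : (s.lookup "royalty_splits__user_id").getD none = none := by
        rw [show s.lookup "royalty_splits__user_id" = pvUser? s from rfl, hu]; rfl
      simp [pvSeenLoop, pvPairs, huB, hu, ih seen hnd]
    | some ou =>
      cases ou with
      | none =>
        have huB : (s.lookup "royalty_splits__user_id").getD none = none := by
          rw [show s.lookup "royalty_splits__user_id" = pvUser? s from rfl, hu]; rfl
        simp [pvSeenLoop, pvPairs, huB, hu, ih seen hnd]
      | some u =>
        have huB : (s.lookup "royalty_splits__user_id").getD none = some u := by
          rw [show s.lookup "royalty_splits__user_id" = pvUser? s from rfl, hu]; rfl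
        by_cases hmem : (pvRev s, u) ∈ seen
        · have hc : PySem.Set.contains seen (pvRev s, u) = true :=
            (PySem.Set.contains_iff _ _).mpr hmem
          simp only [pvSeenLoop, huB, pvRevB_eq_pvRev, hc, if_true]
          constructor
          · intro h; cases h
          · intro h
            exfalso
            have hd := (List.nodup_append.mp h).2.2
            exact hd _ hmem _ (by simp [pvPairs, hu]) rfl
        · have hc : PySem.Set.contains seen (pvRev s, u) = false := by
            cases hct : PySem.Set.contains seen (pvRev s, u)
            · rfl
            · exact absurd (((PySem.Set.contains_iff _ _).mp hct)) hmem
          have hadd : PySem.Set.add seen (pvRev s, u) = seen ++ [(pvRev s, u)] :=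
            PySem.Set.add_of_not_mem hmem
          have hnd' : List.Nodup (seen ++ [(pvRev s, u)]) := by
            rw [List.nodup_append]
            refine ⟨hnd, List.nodup_singleton _, ?_⟩
            intro a ha b hb
            simp only [List.mem_singleton] at hb
            subst hb
            exact fun he => hmem (he ▸ ha)
          simp only [pvSeenLoop, huB, pvRevB_eq_pvRev, hc, if_false, Bool.false_eq_true, hadd]
          rw [ih _ hnd']
          constructor
          · intro h
            simpa [pvPairs, hu, List.append_assoc] using h
          · intro h
            simpa [pvPairs, hu, List.append_assoc] using h

-- the non-None user ids of the splits of l whose revision is k, as a filterMap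
def pvUsersOf (g : List (List (String × Option Int))) : List Int :=
  g.filterMap (fun s =>
    match pvUser? s with
    | some (some u) => some u
    | _ => none)

theorem pvUsersOf_filter (l : List (List (String × Option Int))) (k : Option Int) :
    pvUsersOf (l.filter (fun s => pvRev s == k)) =
      ((pvPairs l).filter (fun p => p.1 == k)).map (·.2) := by
  induction l with
  | nil => rfl
  | cons s rest ih =>
    cases hu : pvUser? s with
    | none =>
      by_cases hr : pvRev s = k <;>
        simp [pvUsersOf, pvPairs, hu, hr] at ih ⊢ <;>
        simpa [pvUsersOf, pvPairs] using ih
    | some ou =>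
      cases ou with
      | none =>
        by_cases hr : pvRev s = k <;>
          simp [pvUsersOf, pvPairs, hu, hr] at ih ⊢ <;>
          simpa [pvUsersOf, pvPairs] using ih
      | some u =>
        by_cases hr : pvRev s = k <;>
          simp [pvUsersOf, pvPairs, hu, hr] at ih ⊢ <;>
          simpa [pvUsersOf, pvPairs] using ih

-- set(xs) keeps a subsequence of xs (first occurrences in order)
theorem pvOfList_sublist {α : Type} [BEq α] [LawfulBEq α] (xs : List α) :
    List.Sublist (PySem.Set.ofList xs) xs := by
  induction xs with
  | nil => simp [PySem.Set.ofList_nil]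
  | cons x r ih =>
    rw [PySem.Set.ofList_cons]
    exact List.Sublist.cons₂ _ (List.Sublist.trans List.filter_sublist ih)

-- len(xs) == len(set(xs)) iff xs has no duplicates
theorem pvLenSet_iff {α : Type} [BEq α] [LawfulBEq α] (xs : List α) :
    (xs.length == (PySem.Set.ofList xs).length) = true ↔ xs.Nodup := by
  rw [beq_iff_eq]
  constructor
  · intro h
    have heq := List.Sublist.eq_of_length (pvOfList_sublist xs) h.symm
    exact heq ▸ PySem.Set.nodup_ofList xs
  · intro h
    rw [PySem.Set.ofList_eq_self_of_nodup xs h]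

-- a pair list whose per-key second components are duplicate-free is duplicate-free
theorem pvPairsNodup_of {α β : Type} [BEq α] [LawfulBEq α]
    (L : List (α × β)) (K : List α) :
    (∀ p ∈ L, p.1 ∈ K) →
    (∀ k ∈ K, ((L.filter (fun p => p.1 == k)).map (·.2)).Nodup) → L.Nodup := by
  induction L with
  | nil => intro _ _; exact List.nodup_nil
  | cons p rest ih =>
    intro hcov h
    refine List.nodup_cons.mpr ⟨?_, ?_⟩
    · intro hpmem
      have hsnd := h p.1 (hcov p (List.mem_cons_self))
      rw [List.filter_cons] at hsnd
      simp only [beq_self_eq_true, if_true, List.map_cons] at hsnd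
      have := (List.nodup_cons.mp hsnd).1
      exact this (List.mem_map_of_mem (List.mem_filter.mpr ⟨hpmem, beq_self_eq_true p.1⟩))
    · refine ih (fun q hq => hcov q (List.mem_cons_of_mem _ hq)) ?_
      intro k hk
      have := h k hk
      rw [List.filter_cons] at this
      by_cases hc : (p.1 == k) = true
      · rw [if_pos hc, List.map_cons] at this
        exact (List.nodup_cons.mp this).2
      · rwa [if_neg hc] at this

-- a list of pairs is duplicate-free iff, for every key covering all firsts,
-- the seconds of the pairs with that key are duplicate-free
theorem pvPairsNodup_iff {α β : Type} [BEq α] [LawfulBEq α]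
    (L : List (α × β)) (K : List α) (hcov : ∀ p ∈ L, p.1 ∈ K) :
    L.Nodup ↔ ∀ k ∈ K, ((L.filter (fun p => p.1 == k)).map (·.2)).Nodup := by
  constructor
  · intro h k _
    refine List.Nodup.map_on ?_ (List.Nodup.filter _ h)
    intro q hq r hr hqr
    have hq1 : q.1 = k := by simpa using (List.mem_filter.mp hq).2
    have hr1 : r.1 = k := by simpa using (List.mem_filter.mp hr).2
    exact Prod.ext (hq1.trans hr1.symm) hqr
  · exact pvPairsNodup_of L K hcov

-- A's grouping loop as a fold over (revision, split) pairs
theorem pvGroup_eq_pairfold (l : List (List (String × Option Int))) :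
    pvGroupSplitsByRevision l =
      (l.map (fun s => (pvRev s, s))).foldl
        (fun d p => d.modify p.1 [] (· ++ [p.2])) PySem.Dict.empty := by
  rw [List.foldl_map]
  rfl

-- A's grouped dict: lookup with default [] is the order-preserving filter by revision
theorem pvGroup_getD (l : List (List (String × Option Int))) (k : Option Int) :
    (pvGroupSplitsByRevision l).getD k [] = l.filter (fun s => pvRev s == k) := by
  rw [pvGroup_eq_pairfold, PySem.Dict.getD_foldl_modify_append]
  simp [List.filter_map, List.map_map, Function.comp_def]

theorem pvGroup_keys (l : List (List (String × Option Int))) :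
    (pvGroupSplitsByRevision l).keys = PySem.Set.ofList (l.map pvRev) := by
  unfold pvGroupSplitsByRevision
  rw [PySem.Dict.keys_foldl_modify_key]
  rw [PySem.Dict.keys_empty, PySem.Set.update_nil_left]

theorem pvGroup_keys_nodup (l : List (List (String × Option Int))) :
    (pvGroupSplitsByRevision l).keys.Nodup := by
  rw [pvGroup_keys]
  exact PySem.Set.nodup_ofList _

theorem pvA_iff (l : List (List (String × Option Int))) :
    split_does_not_have_multiple_splits_for_same_user l = true ↔
      ∀ k ∈ (pvGroupSplitsByRevision l).keys,
        (pvUsersOf (l.filter (fun s => pvRev s == k))).Nodup := by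
  have hnd := pvGroup_keys_nodup l
  rw [show split_does_not_have_multiple_splits_for_same_user l =
        ((pvGroupSplitsByRevision l).items.all fun kv =>
          ((pvUsersOf kv.2).length == (PySem.Set.ofList (pvUsersOf kv.2)).length)) from rfl]
  rw [List.all_eq_true]
  constructor
  · intro h k hk
    simp only [PySem.Dict.keys] at hk
    obtain ⟨kv, hkv, hfst⟩ := List.mem_map.mp hk
    have hval : (pvGroupSplitsByRevision l).getD kv.1 [] = kv.2 :=
      PySem.Dict.getD_of_mem_items _ hkv hnd []
    have hflt : kv.2 = l.filter (fun s => pvRev s == kv.1) := by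
      rw [← hval, pvGroup_getD]
    subst hfst
    rw [← hflt]
    exact (pvLenSet_iff _).mp (h kv hkv)
  · intro h kv hkv
    have hk : kv.1 ∈ (pvGroupSplitsByRevision l).keys := by
      simp only [PySem.Dict.keys]
      exact List.mem_map.mpr ⟨kv, hkv, rfl⟩
    have hval : (pvGroupSplitsByRevision l).getD kv.1 [] = kv.2 :=
      PySem.Dict.getD_of_mem_items _ hkv hnd []
    have hflt : kv.2 = l.filter (fun s => pvRev s == kv.1) := by
      rw [← hval, pvGroup_getD]
    exact (pvLenSet_iff (pvUsersOf kv.2)).mpr (by rw [hflt]; exact h kv.1 hk)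

-- every pair's revision occurs among the grouped dict's keys
theorem pvPairs_fst_mem_keys (l : List (List (String × Option Int))) :
    ∀ p ∈ pvPairs l, p.1 ∈ (pvGroupSplitsByRevision l).keys := by
  intro p hp
  rw [pvGroup_keys, PySem.Set.mem_ofList]
  rcases List.mem_filterMap.mp hp with ⟨s, hs, hm⟩
  cases hu : pvUser? s with
  | none => rw [hu] at hm; simp at hm
  | some ou =>
    cases ou with
    | none => rw [hu] at hm; simp at hm
    | some u =>
      rw [hu] at hm
      simp only [Option.some.injEq] at hm
      rw [← hm]
      exact List.mem_map_of_mem hs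

-- ===== VERDICT (by name: the statement is the Claim_ definition above) =====
theorem split_does_not_have_multiple_splits_for_same_user_spec : Claim_equal_split_does_not_have_multiple_splits_for_same_user := by
  intro l _ _
  unfold Spec_split_does_not_have_multiple_splits_for_same_user
  have hBiff : split_does_not_have_multiple_splits_for_same_user_alt l = true ↔ (pvPairs l).Nodup := by
    rw [show split_does_not_have_multiple_splits_for_same_user_alt l = pvSeenLoop [] l from rfl]
    simpa using pvSeenLoop_iff l [] List.nodup_nil
  have hAiff : split_does_not_have_multiple_splits_for_same_user l = true ↔ (pvPairs l).Nodup := by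
    rw [pvA_iff,
      pvPairsNodup_iff (pvPairs l) ((pvGroupSplitsByRevision l).keys) (pvPairs_fst_mem_keys l)]
    exact forall₂_congr fun k _ => iff_of_eq (congrArg List.Nodup (pvUsersOf_filter l k))
  by_cases hnd : (pvPairs l).Nodup
  · rw [hAiff.mpr hnd, hBiff.mpr hnd]
  · have hA : split_does_not_have_multiple_splits_for_same_user l = false :=
      Bool.eq_false_iff.mpr fun hc => hnd (hAiff.mp hc)
    have hB : split_does_not_have_multiple_splits_for_same_user_alt l = false :=
      Bool.eq_false_iff.mpr fun hc => hnd (hBiff.mp hc)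
    rw [hA, hB]
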